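-- pv_equiv track=rewrite | github.com/cogent3/cogent3 | src/cogent3/parse/genbank.py | indent_splitter
-- ===== SOURCE A (Python) =====
-- def indent_splitter(lines):
--     """Yields the lines whenever it hits a line with same indent level as first."""
--     first_line = True
--     curr = []
--     for line in lines:
--         # skip blank lines
--         line = line.rstrip()
--         if not line:
--             continue
--         # need to figure out indent if first line
--         if first_line:
--             indent = len(line) - len(line.lstrip())
--             curr.append(line)
--             first_line = False
--         elif len(line) > indent and line[indent].isspace():
--             curr.append(line)
--         else:  # got a line that doesn't match the indent
--             yield curr
--             curr = [line]
--     if curr: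
--         yield curr
-- ===== SOURCE B (Python) =====
-- def indent_splitter(lines):
--     """Yields the lines whenever it hits a line with same indent level as first."""
--     rows = [r for r in (line.rstrip() for line in lines) if r]
--     if not rows:
--         return
--     indent = len(rows[0]) - len(rows[0].lstrip())
--     groups = []
--     curr = []
--     for r in reversed(rows):
--         curr = [r] + curr
--         if not (len(r) > indent and r[indent].isspace()):
--             groups.append(curr)
--             curr = []
--     yield from reversed(groups)
-- ===== Notes on version B (the rewrite author's own statement) =====
-- stated objective: alternative
-- what changed: B first gathers the non-blank rstripped rows, then builds the groups back-to-front in a single reverse pass that closes a group at each break row (the first row always breaks, so no leftover-group check is needed), instead of A's streaming forward accumulator with a first-line flag and a final flush.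
import Mathlib
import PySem

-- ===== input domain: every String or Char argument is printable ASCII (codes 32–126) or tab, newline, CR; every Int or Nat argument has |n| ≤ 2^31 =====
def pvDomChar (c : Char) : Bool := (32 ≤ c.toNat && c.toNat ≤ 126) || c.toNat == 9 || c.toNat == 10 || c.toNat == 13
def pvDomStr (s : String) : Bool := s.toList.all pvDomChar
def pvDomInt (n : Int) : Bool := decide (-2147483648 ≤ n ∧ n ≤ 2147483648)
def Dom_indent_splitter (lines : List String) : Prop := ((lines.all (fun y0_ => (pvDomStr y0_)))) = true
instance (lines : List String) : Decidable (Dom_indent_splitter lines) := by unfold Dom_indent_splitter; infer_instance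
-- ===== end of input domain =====

-- B gathers the non-blank rstripped rows and builds the groups back-to-front in one reverse
-- pass, instead of A's forward streaming accumulator with a first-line flag and final flush.
-- Equivalence of the returned list of groups (both Pythons are generators; outputs compared as lists).

-- ===== PORT A =====
-- `len(line) > indent and line[indent].isspace()` (both sources contain this test verbatim)
def pvCont (indent : Nat) (r : String) : Bool :=
  decide (r.toList.length > indent) && (((r.toList[indent]?).map PySem.Chars.isspace).getD false)

def pvStepA (st : Option Nat × List String × List (List String)) (line : String) :
    Option Nat × List String × List (List String) :=
  let l := PySem.Str.rstrip line
  if l = "" then st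
  else
    match st with
    | (none, curr, out) =>
        (some (l.toList.length - (PySem.Str.lstrip l).toList.length), curr ++ [l], out)
    | (some indent, curr, out) =>
        if pvCont indent l then (some indent, curr ++ [l], out)
        else (some indent, [l], out ++ [curr])

def indent_splitter (lines : List String) : List (List String) :=
  let st := lines.foldl pvStepA (none, [], [])
  if st.2.1 = [] then st.2.2 else st.2.2 ++ [st.2.1]

-- ===== PORT B =====
def pvStepB (indent : Nat) (st : List String × List (List String)) (r : String) :
    List String × List (List String) :=
  let curr := [r] ++ st.1
  if !(pvCont indent r) then ([], st.2 ++ [curr]) else (curr, st.2)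

def indent_splitter_alt (lines : List String) : List (List String) :=
  let rows := (lines.map PySem.Str.rstrip).filter (fun r => r ≠ "")
  match rows with
  | [] => []
  | r0 :: _ =>
    let indent := r0.toList.length - (PySem.Str.lstrip r0).toList.length
    (rows.reverse.foldl (pvStepB indent) ([], [])).2.reverse

-- ===== PRECONDITION & SPEC =====
def Spec_indent_splitter (lines : List String) (out : List (List String)) : Prop := out = indent_splitter_alt lines
instance (lines : List String) (out : List (List String)) : Decidable (Spec_indent_splitter lines out) := by unfold Spec_indent_splitter; infer_instance

-- ===== CLAIM (what is proved, stated in full; the proofs are below) =====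
def Claim_equal_indent_splitter : Prop := ∀ (lines : List String), Dom_indent_splitter lines → Spec_indent_splitter lines (indent_splitter lines)

-- ===== LEMMAS AND PROOFS =====

-- the non-blank branch of A's loop body, on the already-rstripped line
def pvCore (st : Option Nat × List String × List (List String)) (l : String) :
    Option Nat × List String × List (List String) :=
  match st with
  | (none, curr, out) =>
      (some (l.toList.length - (PySem.Str.lstrip l).toList.length), curr ++ [l], out)
  | (some indent, curr, out) =>
      if pvCont indent l then (some indent, curr ++ [l], out)
      else (some indent, [l], out ++ [curr])

def pvFinish (st : Option Nat × List String × List (List String)) : List (List String) :=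
  if st.2.1 = [] then st.2.2 else st.2.2 ++ [st.2.1]

-- the common mathematical shape: split at every row that does not continue the indent
def pvChunks (indent : Nat) : List String → List (List String)
  | [] => []
  | r :: rs =>
      (r :: rs.takeWhile (pvCont indent)) :: pvChunks indent (rs.dropWhile (pvCont indent))
termination_by rs => rs.length
decreasing_by simpa using Nat.lt_succ_of_le (List.length_dropWhile_le _ _)

theorem pvCont_self_false (r : String) :
    pvCont (r.toList.length - (PySem.Str.lstrip r).toList.length) r = false := by
  simp only [pvCont, PySem.Str.toList_lstrip, PySem.Chars.lstrip]
  have hsplit := List.takeWhile_append_dropWhile (p := PySem.Chars.isspace) (l := r.toList)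
  have hlen : (r.toList.takeWhile PySem.Chars.isspace).length +
      (r.toList.dropWhile PySem.Chars.isspace).length = r.toList.length := by
    rw [← List.length_append, hsplit]
  cases hd : r.toList.dropWhile PySem.Chars.isspace with
  | nil => simp [hd]
  | cons c t =>
      rw [hd] at hlen
      have hind : r.toList.length - (c :: t).length =
          (r.toList.takeWhile PySem.Chars.isspace).length := by omega
      rw [hind]
      have hget : ∀ k, k = (r.toList.takeWhile PySem.Chars.isspace).length →
          r.toList[k]? = some c := by
        intro k hk
        have h2 : r.toList = r.toList.takeWhile PySem.Chars.isspace ++ (c :: t) := by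
          conv_lhs => rw [← hsplit, hd]
        rw [h2, List.getElem?_append_right (le_of_eq hk.symm)]
        simp [hk]
      have hc : PySem.Chars.isspace c = false := by
        have := List.head_dropWhile_not PySem.Chars.isspace (l := r.toList) (by simp [hd])
        simpa [hd] using this
      simp [hget _ rfl, hc]

theorem foldA_eq (ind : Nat) (rs : List String) (curr : List String) (out : List (List String))
    (h : curr ≠ []) :
    pvFinish (rs.foldl pvCore (some ind, curr, out)) =
      out ++ [curr ++ rs.takeWhile (pvCont ind)] ++ pvChunks ind (rs.dropWhile (pvCont ind)) := by
  induction rs generalizing curr out with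
  | nil => simp [pvFinish, pvChunks, h]
  | cons r rest ih =>
      by_cases hc : pvCont ind r
      · have := ih (curr ++ [r]) out (by simp)
        simp only [List.foldl_cons, pvCore, hc, if_pos, List.takeWhile_cons,
          List.dropWhile_cons] at *
        simp [hc, this]
      · have := ih [r] (out ++ [curr]) (by simp)
        simp only [List.foldl_cons, pvCore, hc, List.takeWhile_cons, List.dropWhile_cons] at *
        simp [hc, this, pvChunks]

theorem foldB_eq (ind : Nat) (rs : List String) :
    rs.foldr (fun r st => pvStepB ind st r) ([], []) =
      (rs.takeWhile (pvCont ind), (pvChunks ind (rs.dropWhile (pvCont ind))).reverse) := by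
  induction rs with
  | nil => simp [pvChunks]
  | cons r rest ih =>
      simp only [List.foldr_cons, ih]
      by_cases h : pvCont ind r
      · simp [pvStepB, h, List.takeWhile_cons, List.dropWhile_cons]
      · simp only [Bool.eq_false_iff] at *
        simp [pvStepB, h, List.takeWhile_cons, List.dropWhile_cons, pvChunks]

theorem foldl_stepA_eq (lines : List String) (st : Option Nat × List String × List (List String)) :
    lines.foldl pvStepA st =
      ((lines.map PySem.Str.rstrip).filter (fun r => r ≠ "")).foldl pvCore st := by
  rw [List.foldl_filter, List.foldl_map]
  induction lines generalizing st with
  | nil => rfl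
  | cons x xs ih =>
      simp only [List.foldl_cons, ih]
      congr 1
      show pvStepA st x = _
      unfold pvStepA pvCore
      by_cases h : PySem.Str.rstrip x = "" <;> simp [h]

-- ===== VERDICT (by name: the statement is the Claim_ definition above) =====
theorem indent_splitter_spec : Claim_equal_indent_splitter := by
  intro lines _
  show indent_splitter lines = indent_splitter_alt lines
  have hA : indent_splitter lines =
      pvFinish (((lines.map PySem.Str.rstrip).filter (fun r => r ≠ "")).foldl pvCore (none, [], [])) := by
    show pvFinish (lines.foldl pvStepA (none, [], [])) = _
    rw [foldl_stepA_eq]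
  rw [hA]
  unfold indent_splitter_alt
  cases hrows : (lines.map PySem.Str.rstrip).filter (fun r => r ≠ "") with
  | nil => simp [pvFinish]
  | cons r0 rest =>
      show pvFinish ((r0 :: rest).foldl pvCore (none, [], [])) =
        ((r0 :: rest).reverse.foldl
          (pvStepB (r0.toList.length - (PySem.Str.lstrip r0).toList.length)) ([], [])).2.reverse
      have hstep : pvCore (none, [], []) r0 =
          (some (r0.toList.length - (PySem.Str.lstrip r0).toList.length), [r0], []) := by
        simp [pvCore]
      rw [List.foldl_cons, hstep,
        foldA_eq _ rest [r0] [] (by simp), List.foldl_reverse, foldB_eq]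
      simp only [List.reverse_reverse, List.dropWhile_cons, pvCont_self_false,
        Bool.false_eq_true, if_false]
      conv_rhs => rw [pvChunks.eq_def]
      simp
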